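-- pv_equiv track=rewrite | github.com/keithjohnson5745/RelatedVideos | analysis_helpers.py | categorize_videos_by_length
-- ===== SOURCE A (Python) =====
-- def categorize_videos_by_length(videos):
--     bins = {
--         "0-1 min": 0,
--         "1-5 min": 0,
--         "5-10 min": 0,
--         "10-20 min": 0,
--         "20+ min": 0
--     }
--
--     for vid in videos:
--         seconds = vid.get("parsed_length", 0)
--         if seconds <= 60:
--             bins["0-1 min"] += 1
--         elif seconds < 300:   # 5 min
--             bins["1-5 min"] += 1
--         elif seconds < 600:   # 10 min
--             bins["5-10 min"] += 1
--         elif seconds < 1200:  # 20 min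
--             bins["10-20 min"] += 1
--         else:
--             bins["20+ min"] += 1
--
--     return bins
-- ===== SOURCE B (Python) =====
-- def categorize_videos_by_length(videos):
--     secs = [vid.get("parsed_length", 0) for vid in videos]
--     c60 = sum(1 for s in secs if s <= 60)
--     c300 = sum(1 for s in secs if s < 300)
--     c600 = sum(1 for s in secs if s < 600)
--     c1200 = sum(1 for s in secs if s < 1200)
--     return {
--         "0-1 min": c60,
--         "1-5 min": c300 - c60,
--         "5-10 min": c600 - c300,
--         "10-20 min": c1200 - c600,
--         "20+ min": len(secs) - c1200,
--     }
-- ===== Notes on version B (the rewrite author's own statement) =====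
-- stated objective: alternative
-- what changed: Replaces the single-pass if-elif dict-updating loop with staged passes: extract the seconds once, count cumulatively below each threshold, and form each bin as a difference of adjacent cumulative counts.
import Mathlib
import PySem

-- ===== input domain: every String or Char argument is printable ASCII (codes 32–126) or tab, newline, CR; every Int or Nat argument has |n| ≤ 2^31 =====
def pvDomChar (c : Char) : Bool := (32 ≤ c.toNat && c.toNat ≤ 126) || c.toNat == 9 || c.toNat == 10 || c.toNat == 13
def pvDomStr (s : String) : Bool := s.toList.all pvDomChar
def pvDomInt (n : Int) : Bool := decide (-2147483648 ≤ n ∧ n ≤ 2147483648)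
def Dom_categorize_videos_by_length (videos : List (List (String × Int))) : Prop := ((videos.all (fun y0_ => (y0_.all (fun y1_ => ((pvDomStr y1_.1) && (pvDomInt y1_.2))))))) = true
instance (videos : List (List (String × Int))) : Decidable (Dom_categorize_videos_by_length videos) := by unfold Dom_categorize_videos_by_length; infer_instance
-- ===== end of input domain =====

-- B replaces A's single-pass if-elif dict-updating loop with staged passes: extract the
-- seconds once, count cumulatively below each threshold, and form each bin as a
-- difference of adjacent cumulative counts (objective: alternative).

-- ===== PORT A =====
def categorize_videos_by_length (videos : List (List (String × Int))) : List (String × Int) :=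
  let bins : PySem.Dict String Int :=
    PySem.Dict.mk [("0-1 min", 0), ("1-5 min", 0), ("5-10 min", 0), ("10-20 min", 0), ("20+ min", 0)]
  (videos.foldl (fun bins vid =>
    let seconds := (PySem.Dict.mk vid).getD "parsed_length" 0
    if seconds ≤ 60 then bins.modify "0-1 min" 0 (· + 1)
    else if seconds < 300 then bins.modify "1-5 min" 0 (· + 1)
    else if seconds < 600 then bins.modify "5-10 min" 0 (· + 1)
    else if seconds < 1200 then bins.modify "10-20 min" 0 (· + 1)
    else bins.modify "20+ min" 0 (· + 1)) bins).items

-- ===== PORT B =====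
def categorize_videos_by_length_alt (videos : List (List (String × Int))) : List (String × Int) :=
  let secs := videos.map (fun vid => (PySem.Dict.mk vid).getD "parsed_length" 0)
  let c60 : Int := secs.countP (fun s => s ≤ 60)
  let c300 : Int := secs.countP (fun s => s < 300)
  let c600 : Int := secs.countP (fun s => s < 600)
  let c1200 : Int := secs.countP (fun s => s < 1200)
  [("0-1 min", c60), ("1-5 min", c300 - c60), ("5-10 min", c600 - c300),
   ("10-20 min", c1200 - c600), ("20+ min", (secs.length : Int) - c1200)]

-- ===== PRECONDITION & SPEC =====
def Spec_categorize_videos_by_length (videos : List (List (String × Int))) (out : List (String × Int)) : Prop := out = categorize_videos_by_length_alt videos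
instance (videos : List (List (String × Int))) (out : List (String × Int)) : Decidable (Spec_categorize_videos_by_length videos out) := by unfold Spec_categorize_videos_by_length; infer_instance

-- ===== CLAIM (what is proved, stated in full; the proofs are below) =====
def Claim_equal_categorize_videos_by_length : Prop := ∀ (videos : List (List (String × Int))), Dom_categorize_videos_by_length videos → Spec_categorize_videos_by_length videos (categorize_videos_by_length videos)

-- ===== LEMMAS AND PROOFS =====
lemma pv_loop_eq : ∀ (videos : List (List (String × Int))) (a b c d e : Int),
    (videos.foldl (fun bins vid =>
      let seconds := (PySem.Dict.mk vid).getD "parsed_length" 0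
      if seconds ≤ 60 then PySem.Dict.modify bins "0-1 min" 0 (· + 1)
      else if seconds < 300 then PySem.Dict.modify bins "1-5 min" 0 (· + 1)
      else if seconds < 600 then PySem.Dict.modify bins "5-10 min" 0 (· + 1)
      else if seconds < 1200 then PySem.Dict.modify bins "10-20 min" 0 (· + 1)
      else PySem.Dict.modify bins "20+ min" 0 (· + 1))
      (PySem.Dict.mk [("0-1 min", a), ("1-5 min", b), ("5-10 min", c), ("10-20 min", d), ("20+ min", e)])).items
    = (let secs := videos.map (fun vid => (PySem.Dict.mk vid).getD "parsed_length" 0)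
       let c60 : Int := secs.countP (fun s => s ≤ 60)
       let c300 : Int := secs.countP (fun s => s < 300)
       let c600 : Int := secs.countP (fun s => s < 600)
       let c1200 : Int := secs.countP (fun s => s < 1200)
       [("0-1 min", a + c60), ("1-5 min", b + (c300 - c60)), ("5-10 min", c + (c600 - c300)),
        ("10-20 min", d + (c1200 - c600)), ("20+ min", e + ((secs.length : Int) - c1200))])
  | [], a, b, c, d, e => by simp
  | vid :: rest, a, b, c, d, e => by
    simp only [List.foldl_cons, List.map_cons, List.countP_cons, List.length_cons]
    set s := (PySem.Dict.mk vid).getD "parsed_length" 0 with hs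
    by_cases h1 : s ≤ 60
    · rw [if_pos h1]
      have e60 : decide (s ≤ 60) = true := by simp only [decide_eq_true_eq]; omega
      have e300 : decide (s < 300) = true := by simp only [decide_eq_true_eq]; omega
      have e600 : decide (s < 600) = true := by simp only [decide_eq_true_eq]; omega
      have e1200 : decide (s < 1200) = true := by simp only [decide_eq_true_eq]; omega
      refine Eq.trans (pv_loop_eq rest (a + 1) b c d e) ?_
      simp only [e60, e300, e600, e1200, Bool.false_eq_true, if_true, if_false,
        List.cons.injEq, Prod.mk.injEq, true_and, and_true]
      push_cast
      omega
    · rw [if_neg h1]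
      by_cases h2 : s < 300
      · rw [if_pos h2]
        have e60 : decide (s ≤ 60) = false := by simp only [decide_eq_false_iff_not]; omega
        have e300 : decide (s < 300) = true := by simp only [decide_eq_true_eq]; omega
        have e600 : decide (s < 600) = true := by simp only [decide_eq_true_eq]; omega
        have e1200 : decide (s < 1200) = true := by simp only [decide_eq_true_eq]; omega
        refine Eq.trans (pv_loop_eq rest a (b + 1) c d e) ?_
        simp only [e60, e300, e600, e1200, Bool.false_eq_true, if_true, if_false,
          List.cons.injEq, Prod.mk.injEq, true_and, and_true]
        push_cast
        omega
      · rw [if_neg h2]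
        by_cases h3 : s < 600
        · rw [if_pos h3]
          have e60 : decide (s ≤ 60) = false := by simp only [decide_eq_false_iff_not]; omega
          have e300 : decide (s < 300) = false := by simp only [decide_eq_false_iff_not]; omega
          have e600 : decide (s < 600) = true := by simp only [decide_eq_true_eq]; omega
          have e1200 : decide (s < 1200) = true := by simp only [decide_eq_true_eq]; omega
          refine Eq.trans (pv_loop_eq rest a b (c + 1) d e) ?_
          simp only [e60, e300, e600, e1200, Bool.false_eq_true, if_true, if_false,
            List.cons.injEq, Prod.mk.injEq, true_and, and_true]
          push_cast
          omega
        · rw [if_neg h3]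
          by_cases h4 : s < 1200
          · rw [if_pos h4]
            have e60 : decide (s ≤ 60) = false := by simp only [decide_eq_false_iff_not]; omega
            have e300 : decide (s < 300) = false := by simp only [decide_eq_false_iff_not]; omega
            have e600 : decide (s < 600) = false := by simp only [decide_eq_false_iff_not]; omega
            have e1200 : decide (s < 1200) = true := by simp only [decide_eq_true_eq]; omega
            refine Eq.trans (pv_loop_eq rest a b c (d + 1) e) ?_
            simp only [e60, e300, e600, e1200, Bool.false_eq_true, if_true, if_false,
              List.cons.injEq, Prod.mk.injEq, true_and, and_true]
            push_cast
            omega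
          · rw [if_neg h4]
            have e60 : decide (s ≤ 60) = false := by simp only [decide_eq_false_iff_not]; omega
            have e300 : decide (s < 300) = false := by simp only [decide_eq_false_iff_not]; omega
            have e600 : decide (s < 600) = false := by simp only [decide_eq_false_iff_not]; omega
            have e1200 : decide (s < 1200) = false := by simp only [decide_eq_false_iff_not]; omega
            refine Eq.trans (pv_loop_eq rest a b c d (e + 1)) ?_
            simp only [e60, e300, e600, e1200, Bool.false_eq_true, if_true, if_false,
              List.cons.injEq, Prod.mk.injEq, true_and, and_true]
            push_cast
            omega

-- ===== VERDICT (by name: the statement is the Claim_ definition above) =====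
theorem categorize_videos_by_length_spec : Claim_equal_categorize_videos_by_length := by
  intro videos _
  unfold Spec_categorize_videos_by_length categorize_videos_by_length categorize_videos_by_length_alt
  simpa using pv_loop_eq videos 0 0 0 0 0
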